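-- pv_equiv track=rewrite | github.com/sxnmit/signal | analyzer.py | parse_stories
-- ===== SOURCE A (Python) =====
-- def parse_stories(text: str) -> list[dict]:
--     """Parse Groq's formatted output into structured story dicts."""
--     stories = []
--     blocks = [b.strip() for b in text.split("---") if b.strip()]
--
--     for block in blocks:
--         story = {"headline": "", "source": "", "url": "", "summary": ""}
--         for line in block.splitlines():
--             line = line.strip()
--             if line.startswith("HEADLINE:"):
--                 story["headline"] = line[len("HEADLINE:") :].strip()
--             elif line.startswith("SOURCE:"):
--                 story["source"] = line[len("SOURCE:") :].strip()
--             elif line.startswith("URL:"):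
--                 story["url"] = line[len("URL:") :].strip()
--             elif line.startswith("SUMMARY:"):
--                 story["summary"] = line[len("SUMMARY:") :].strip()
--         if story["headline"]:
--             stories.append(story)
--
--     return stories
-- ===== SOURCE B (Python) =====
-- _FIELDS = (("HEADLINE:", "headline"), ("SOURCE:", "source"),
--            ("URL:", "url"), ("SUMMARY:", "summary"))
--
--
-- def _last_value(lines, prefix):
--     """Value of the last line starting with prefix, or ''."""
--     for line in reversed(lines):
--         if line.startswith(prefix):
--             return line[len(prefix):].strip()
--     return ""
--
--
-- def parse_stories(text: str) -> list[dict]: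
--     """Parse Groq's formatted output into structured story dicts."""
--     stories = []
--     for raw in text.split("---"):
--         lines = [l.strip() for l in raw.strip().splitlines()]
--         story = {field: _last_value(lines, prefix) for prefix, field in _FIELDS}
--         if story["headline"]:
--             stories.append(story)
--     return stories
-- ===== Notes on version B (the rewrite author's own statement) =====
-- stated objective: alternative
-- what changed: Inverts the traversal: instead of one forward pass per block mutating a pre-initialised dict through a four-way elif dispatch on every line (last write wins), B builds each story by four independent per-field backward scans that each return the value of the last matching line directly, and drops A's separate block-prefilter stage.
import Mathlib
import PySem

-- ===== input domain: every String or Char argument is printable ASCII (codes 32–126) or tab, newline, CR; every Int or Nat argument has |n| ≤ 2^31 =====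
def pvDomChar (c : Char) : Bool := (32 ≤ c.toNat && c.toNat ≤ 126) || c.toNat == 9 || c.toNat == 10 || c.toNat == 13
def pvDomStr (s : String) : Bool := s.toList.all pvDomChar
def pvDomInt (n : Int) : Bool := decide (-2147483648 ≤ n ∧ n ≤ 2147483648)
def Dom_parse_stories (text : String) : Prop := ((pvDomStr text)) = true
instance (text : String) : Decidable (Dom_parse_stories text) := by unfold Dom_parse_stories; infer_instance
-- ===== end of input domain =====

-- B inverts the traversal: instead of A's forward pass per block mutating a pre-initialised dict
-- through a four-way elif dispatch on every line, B builds each story field by an independent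
-- backward scan returning the last matching line's value, with no separate block-prefilter stage
-- (objective: alternative, same cost).

-- ===== PORT A =====
-- one line of A's inner loop: the startswith/slice elif chain
def paLine (story : PySem.Dict String String) (line0 : String) : PySem.Dict String String :=
  let line := PySem.Str.strip line0
  if PySem.Str.startswith line "HEADLINE:" then
    story.insert "headline" (PySem.Str.strip (PySem.Str.slice line (some 9) none))
  else if PySem.Str.startswith line "SOURCE:" then
    story.insert "source" (PySem.Str.strip (PySem.Str.slice line (some 7) none))
  else if PySem.Str.startswith line "URL:" then
    story.insert "url" (PySem.Str.strip (PySem.Str.slice line (some 4) none))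
  else if PySem.Str.startswith line "SUMMARY:" then
    story.insert "summary" (PySem.Str.strip (PySem.Str.slice line (some 8) none))
  else story

-- one block of A's outer loop
def paBlock (stories : List (List (String × String))) (block : String) : List (List (String × String)) :=
  let story := (PySem.Str.splitlines block).foldl paLine
    (PySem.Dict.ofList [("headline", ""), ("source", ""), ("url", ""), ("summary", "")])
  if (story.get? "headline").getD "" ≠ "" then stories ++ [story.items] else stories

def parse_stories (text : String) : List (List (String × String)) :=
  let blocks := (((PySem.Str.split? text "---").getD []).map PySem.Str.strip).filter (fun b => b ≠ "")
  blocks.foldl paBlock []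

-- ===== PORT B =====
def pbFields : List (String × String) :=
  [("HEADLINE:", "headline"), ("SOURCE:", "source"), ("URL:", "url"), ("SUMMARY:", "summary")]

-- _last_value: scan the (already reversed) line list, return the first match's value, else ""
def pbLastValue : List String → String → String
  | [], _ => ""
  | line :: rest, pfx =>
      if PySem.Str.startswith line pfx then
        PySem.Str.strip (PySem.Str.slice line (some (PySem.Str.len pfx)) none)
      else pbLastValue rest pfx

-- body of B's loop over text.split("---")
def pbStep (stories : List (List (String × String))) (raw : String) : List (List (String × String)) :=
  let lines := (PySem.Str.splitlines (PySem.Str.strip raw)).map PySem.Str.strip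
  let story := PySem.Dict.ofList (pbFields.map (fun pf => (pf.2, pbLastValue lines.reverse pf.1)))
  if (story.get? "headline").getD "" ≠ "" then stories ++ [story.items] else stories

def parse_stories_alt (text : String) : List (List (String × String)) :=
  ((PySem.Str.split? text "---").getD []).foldl pbStep []

-- ===== PRECONDITION & SPEC =====
def Spec_parse_stories (text : String) (out : List (List (String × String))) : Prop := out = parse_stories_alt text
instance (text : String) (out : List (List (String × String))) : Decidable (Spec_parse_stories text out) := by unfold Spec_parse_stories; infer_instance

-- ===== CLAIM (what is proved, stated in full; the proofs are below) =====
def Claim_equal_parse_stories : Prop := ∀ (text : String), Dom_parse_stories text → Spec_parse_stories text (parse_stories text)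

-- ===== LEMMAS AND PROOFS =====

-- the story dict as a literal record of its four values
def mkD (h s u y : String) : PySem.Dict String String :=
  PySem.Dict.mk [("headline", h), ("source", s), ("url", u), ("summary", y)]

theorem ofList4 (v1 v2 v3 v4 : String) :
    PySem.Dict.ofList [("headline", v1), ("source", v2), ("url", v3), ("summary", v4)] = mkD v1 v2 v3 v4 := rfl

theorem ins_h (h s u y v : String) : (mkD h s u y).insert "headline" v = mkD v s u y := rfl
theorem ins_s (h s u y v : String) : (mkD h s u y).insert "source" v = mkD h v u y := rfl
theorem ins_u (h s u y v : String) : (mkD h s u y).insert "url" v = mkD h s v y := rfl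
theorem ins_y (h s u y v : String) : (mkD h s u y).insert "summary" v = mkD h s u v := rfl

-- at most one of the four prefixes matches a given line
theorem startswith_disj (l p q : List Char) (hpq : ¬ p <+: q) (hqp : ¬ q <+: p)
    (hp : PySem.Chars.startswith l p = true) : PySem.Chars.startswith l q = false := by
  rw [Bool.eq_false_iff, Ne, PySem.Chars.startswith_iff]
  intro hq
  rcases List.prefix_or_prefix_of_prefix ((PySem.Chars.startswith_iff l p).1 hp) hq with h | h
  exacts [hpq h, hqp h]

theorem str_disj (l p q : String) (hpq : ¬ (p.toList <+: q.toList)) (hqp : ¬ (q.toList <+: p.toList))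
    (hp : PySem.Str.startswith l p = true) : PySem.Str.startswith l q = false := by
  rw [PySem.Str.startswith_eq] at hp ⊢
  exact startswith_disj l.toList p.toList q.toList hpq hqp hp

-- A's per-field update, as a last-wins fold over the raw lines
def aupd (pfx : String) (n : Int) (d : String) (lines : List String) : String :=
  lines.foldl (fun a l =>
    if PySem.Str.startswith (PySem.Str.strip l) pfx then
      PySem.Str.strip (PySem.Str.slice (PySem.Str.strip l) (some n) none)
    else a) d

theorem aupd_cons (pfx : String) (n : Int) (d : String) (l : String) (rest : List String) :
    aupd pfx n d (l :: rest) =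
      aupd pfx n (if PySem.Str.startswith (PySem.Str.strip l) pfx then
        PySem.Str.strip (PySem.Str.slice (PySem.Str.strip l) (some n) none) else d) rest := rfl

theorem foldA : ∀ (lines : List String) (h s u y : String),
    lines.foldl paLine (mkD h s u y) =
      mkD (aupd "HEADLINE:" 9 h lines) (aupd "SOURCE:" 7 s lines)
          (aupd "URL:" 4 u lines) (aupd "SUMMARY:" 8 y lines) := by
  intro lines
  induction lines with
  | nil => intro h s u y; rfl
  | cons l rest ih =>
    intro h s u y
    rw [List.foldl_cons, aupd_cons, aupd_cons, aupd_cons, aupd_cons]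
    cases h1 : PySem.Str.startswith (PySem.Str.strip l) "HEADLINE:" with
    | true =>
      have h2 := str_disj _ "HEADLINE:" "SOURCE:" (by decide) (by decide) h1
      have h3 := str_disj _ "HEADLINE:" "URL:" (by decide) (by decide) h1
      have h4 := str_disj _ "HEADLINE:" "SUMMARY:" (by decide) (by decide) h1
      rw [show paLine (mkD h s u y) l = mkD (PySem.Str.strip (PySem.Str.slice (PySem.Str.strip l) (some 9) none)) s u y from by
        simp only [paLine, h1, if_true, ins_h]]
      simp only [h2, h3, h4, if_true, if_false, Bool.false_eq_true]
      exact ih _ _ _ _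
    | false =>
      cases h2 : PySem.Str.startswith (PySem.Str.strip l) "SOURCE:" with
      | true =>
        have h3 := str_disj _ "SOURCE:" "URL:" (by decide) (by decide) h2
        have h4 := str_disj _ "SOURCE:" "SUMMARY:" (by decide) (by decide) h2
        rw [show paLine (mkD h s u y) l = mkD h (PySem.Str.strip (PySem.Str.slice (PySem.Str.strip l) (some 7) none)) u y from by
          simp only [paLine, h1, h2, if_true, Bool.false_eq_true, ite_false, ins_s]]
        simp only [h3, h4, if_true, if_false, Bool.false_eq_true]
        exact ih _ _ _ _
      | false =>
        cases h3 : PySem.Str.startswith (PySem.Str.strip l) "URL:" with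
        | true =>
          have h4 := str_disj _ "URL:" "SUMMARY:" (by decide) (by decide) h3
          rw [show paLine (mkD h s u y) l = mkD h s (PySem.Str.strip (PySem.Str.slice (PySem.Str.strip l) (some 4) none)) y from by
            simp only [paLine, h1, h2, h3, if_true, Bool.false_eq_true, ite_false, ins_u]]
          simp only [h4, if_true, if_false, Bool.false_eq_true]
          exact ih _ _ _ _
        | false =>
          cases h4 : PySem.Str.startswith (PySem.Str.strip l) "SUMMARY:" with
          | true =>
            rw [show paLine (mkD h s u y) l = mkD h s u (PySem.Str.strip (PySem.Str.slice (PySem.Str.strip l) (some 8) none)) from by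
              simp only [paLine, h1, h2, h3, h4, if_true, Bool.false_eq_true, ite_false, ins_y]]
            simp only [if_true, if_false, Bool.false_eq_true]
            exact ih _ _ _ _
          | false =>
            rw [show paLine (mkD h s u y) l = mkD h s u y from by
              simp only [paLine, h1, h2, h3, h4, Bool.false_eq_true, ite_false]]
            simp only [Bool.false_eq_true, ite_false]
            exact ih _ _ _ _

-- a last-wins fold is the first match of the reversed list
theorem lastwins (p : String → Bool) (v : String → String) :
    ∀ (M : List String) (d : String),
      M.foldl (fun a l => if p l then v l else a) d =
        (match M.reverse.find? p with | some l => v l | none => d) := by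
  intro M
  induction M with
  | nil => intro d; rfl
  | cons l M ih =>
    intro d
    rw [List.foldl_cons, ih, List.reverse_cons, List.find?_append]
    cases hf : M.reverse.find? p with
    | some x => simp
    | none =>
      cases hp : p l <;> simp [List.find?, hp]

theorem pbLastValue_eq_find (pfx : String) : ∀ (M : List String),
    pbLastValue M pfx =
      (match M.find? (fun l => PySem.Str.startswith l pfx) with
        | some l => PySem.Str.strip (PySem.Str.slice l (some (PySem.Str.len pfx)) none)
        | none => "") := by
  intro M
  induction M with
  | nil => rfl
  | cons l M ih =>
    cases hp : PySem.Str.startswith l pfx <;>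
      · rw [PySem.Str.startswith_eq] at hp
        simp [pbLastValue, List.find?, hp, ih]

theorem aupd_eq (pfx : String) (n : Int) (hn : n = PySem.Str.len pfx) (raws : List String) :
    aupd pfx n "" raws = pbLastValue ((raws.map PySem.Str.strip).reverse) pfx := by
  subst hn
  unfold aupd
  rw [lastwins (fun l => PySem.Str.startswith (PySem.Str.strip l) pfx)
      (fun l => PySem.Str.strip (PySem.Str.slice (PySem.Str.strip l) (some (PySem.Str.len pfx)) none)) raws ""]
  rw [pbLastValue_eq_find, ← List.map_reverse, List.find?_map]
  simp only [Function.comp_def]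
  cases hf : List.find? (fun l => PySem.Str.startswith (PySem.Str.strip l) pfx) raws.reverse with
  | none => rfl
  | some l => rfl

theorem pbStep_eq (st : List (List (String × String))) (raw : String) :
    pbStep st raw =
      if PySem.Str.strip raw = "" then st else paBlock st (PySem.Str.strip raw) := by
  by_cases h : PySem.Str.strip raw = ""
  · rw [if_pos h]
    unfold pbStep
    rw [h]
    rfl
  · rw [if_neg h]
    unfold pbStep paBlock pbFields
    dsimp only
    rw [List.map_cons, List.map_cons, List.map_cons, List.map_cons, List.map_nil, ofList4]
    rw [show PySem.Dict.ofList [("headline", ""), ("source", ""), ("url", ""), ("summary", "")] = mkD "" "" "" "" from rfl]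
    rw [foldA,
      aupd_eq "HEADLINE:" 9 (by decide), aupd_eq "SOURCE:" 7 (by decide),
      aupd_eq "URL:" 4 (by decide), aupd_eq "SUMMARY:" 8 (by decide)]

theorem fold_skip (g : List (List (String × String)) → String → List (List (String × String))) :
    ∀ (rs : List String) (acc : List (List (String × String))),
      rs.foldl (fun st raw => if PySem.Str.strip raw = "" then st else g st (PySem.Str.strip raw)) acc =
        ((rs.map PySem.Str.strip).filter (fun b => b ≠ "")).foldl g acc := by
  intro rs
  induction rs with
  | nil => intro acc; rfl
  | cons r rs ih =>
    intro acc
    by_cases h : PySem.Str.strip r = "" <;>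
      simp [List.foldl_cons, h, ih]

-- ===== VERDICT (by name: the statement is the Claim_ definition above) =====
theorem parse_stories_spec : Claim_equal_parse_stories := by
  intro text _
  unfold Spec_parse_stories parse_stories parse_stories_alt
  rw [show pbStep = (fun st raw => if PySem.Str.strip raw = "" then st else paBlock st (PySem.Str.strip raw)) from
    funext fun st => funext fun raw => pbStep_eq st raw]
  rw [fold_skip]
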